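-- pv_equiv track=rewrite | github.com/jmerkle/adventOfCode2023 | 11/functions_day_11.py | find_all_distances_between_galaxies
-- ===== SOURCE A (Python) =====
-- def find_distance(galaxy_a: tuple[int, int], galaxy_b: tuple[int, int], expanding_lines: list[int], expanding_columns: list[int]):
--     line_coords_ordered = sorted([galaxy_a[0], galaxy_b[0]])
--     column_coords_ordered = sorted([galaxy_a[1], galaxy_b[1]])
--     distance = line_coords_ordered[1] - line_coords_ordered[0] + column_coords_ordered[1] - column_coords_ordered[0]
--     distance += sum([line_coords_ordered[0] < line < line_coords_ordered[1] for line in expanding_lines])*(1000000-1)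
--     distance += sum([column_coords_ordered[0] < column < column_coords_ordered[1] for column in expanding_columns])*(1000000-1)
--     return distance
--
-- def find_all_distances_between_galaxies(galaxy_coords: tuple[list[int], list[int]], expanding_lines: list[int], expanding_columns: list[int]) -> list[int]:
--     distances = []
--     for galaxy_a_idx in range(0, len(galaxy_coords[0])):
--         galaxy_a = (galaxy_coords[0][galaxy_a_idx], galaxy_coords[1][galaxy_a_idx])
--         for galaxy_b_idx in range(galaxy_a_idx + 1, len(galaxy_coords[0])):
--             galaxy_b = (galaxy_coords[0][galaxy_b_idx], galaxy_coords[1][galaxy_b_idx])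
--             distances.append(find_distance(galaxy_a, galaxy_b, expanding_lines, expanding_columns))
--     return distances
-- ===== SOURCE B (Python) =====
-- def find_all_distances_between_galaxies(galaxy_coords: tuple[list[int], list[int]], expanding_lines: list[int], expanding_columns: list[int]) -> list[int]:
--     # Precompute, once per galaxy, how many expanding lines/columns lie strictly
--     # below (<) and at-or-below (<=) its coordinates; each pair distance is then O(1).
--     GAP = 1000000 - 1
--
--     def counts(entries, v):
--         lt = 0
--         le = 0
--         for e in entries:
--             if e < v:
--                 lt += 1
--             if e <= v:
--                 le += 1
--         return lt, le
--
--     pre = []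
--     for x, y in zip(galaxy_coords[0], galaxy_coords[1]):
--         lx, ex = counts(expanding_lines, x)
--         ly, ey = counts(expanding_columns, y)
--         pre.append((x, y, lx, ex, ly, ey))
--
--     distances = []
--     rest = pre
--     while rest:
--         a = rest[0]
--         rest = rest[1:]
--         for b in rest:
--             d = abs(a[0] - b[0]) + abs(a[1] - b[1])
--             if a[0] != b[0]:
--                 lo, hi = (a, b) if a[0] < b[0] else (b, a)
--                 d += (hi[2] - lo[3]) * GAP
--             if a[1] != b[1]:
--                 lo, hi = (a, b) if a[1] < b[1] else (b, a)
--                 d += (hi[4] - lo[5]) * GAP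
--             distances.append(d)
--     return distances
-- ===== Notes on version B (the rewrite author's own statement) =====
-- stated objective: faster
-- what changed: Instead of rescanning both expansion lists for every galaxy pair, B precomputes per galaxy the number of expanding lines/columns strictly below and at-or-below each coordinate in one pass, so each pair distance is computed in O(1) by differencing those counts.
import Mathlib
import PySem

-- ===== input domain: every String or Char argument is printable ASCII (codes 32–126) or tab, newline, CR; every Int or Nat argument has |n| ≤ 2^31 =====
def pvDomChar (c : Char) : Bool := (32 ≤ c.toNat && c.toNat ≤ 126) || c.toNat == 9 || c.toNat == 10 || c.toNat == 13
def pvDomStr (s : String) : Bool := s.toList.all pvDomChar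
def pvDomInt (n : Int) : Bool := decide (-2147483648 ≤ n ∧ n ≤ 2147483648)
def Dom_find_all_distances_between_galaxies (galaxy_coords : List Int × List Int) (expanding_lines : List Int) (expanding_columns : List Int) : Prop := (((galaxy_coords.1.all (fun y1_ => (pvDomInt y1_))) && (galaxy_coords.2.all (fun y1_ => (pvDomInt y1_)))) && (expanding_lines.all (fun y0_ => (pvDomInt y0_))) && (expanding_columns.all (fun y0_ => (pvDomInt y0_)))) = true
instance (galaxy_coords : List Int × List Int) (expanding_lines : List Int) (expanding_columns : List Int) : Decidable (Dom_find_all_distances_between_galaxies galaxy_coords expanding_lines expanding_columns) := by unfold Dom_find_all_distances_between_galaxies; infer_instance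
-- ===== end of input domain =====

-- B precomputes, once per galaxy, how many expanding lines/columns lie strictly below and
-- at-or-below each coordinate, so each pair distance needs no scan of the expansion lists.

-- ===== PORT A =====
def find_distance (galaxy_a galaxy_b : Int × Int) (expanding_lines expanding_columns : List Int) : Int :=
  let lco := PySem.List.sorted [galaxy_a.1, galaxy_b.1] (fun x => x) false
  let cco := PySem.List.sorted [galaxy_a.2, galaxy_b.2] (fun x => x) false
  let dist := PySem.List.pyGetD lco 1 0 - PySem.List.pyGetD lco 0 0
              + PySem.List.pyGetD cco 1 0 - PySem.List.pyGetD cco 0 0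
  let dist := dist + (expanding_lines.map (fun line =>
      if PySem.List.pyGetD lco 0 0 < line ∧ line < PySem.List.pyGetD lco 1 0 then (1 : Int) else 0)).sum * (1000000 - 1)
  dist + (expanding_columns.map (fun col =>
      if PySem.List.pyGetD cco 0 0 < col ∧ col < PySem.List.pyGetD cco 1 0 then (1 : Int) else 0)).sum * (1000000 - 1)

def find_all_distances_between_galaxies (galaxy_coords : List Int × List Int) (expanding_lines : List Int) (expanding_columns : List Int) : List Int :=
  (PySem.List.pyRange 0 galaxy_coords.1.length 1).foldl (fun dists ia =>
    let galaxy_a := (PySem.List.pyGetD galaxy_coords.1 ia 0, PySem.List.pyGetD galaxy_coords.2 ia 0)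
    (PySem.List.pyRange (ia + 1) galaxy_coords.1.length 1).foldl (fun ds ib =>
      let galaxy_b := (PySem.List.pyGetD galaxy_coords.1 ib 0, PySem.List.pyGetD galaxy_coords.2 ib 0)
      ds ++ [find_distance galaxy_a galaxy_b expanding_lines expanding_columns]) dists) []

-- ===== PORT B =====
def pvCounts (entries : List Int) (v : Int) : Int × Int :=
  entries.foldl (fun (p : Int × Int) e =>
    (if e < v then p.1 + 1 else p.1, if e ≤ v then p.2 + 1 else p.2)) (0, 0)

def pvEnrich (expanding_lines expanding_columns : List Int) (g : Int × Int) :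
    Int × Int × Int × Int × Int × Int :=
  let lx := pvCounts expanding_lines g.1
  let ly := pvCounts expanding_columns g.2
  (g.1, g.2, lx.1, lx.2, ly.1, ly.2)

def pvPairDist (a b : Int × Int × Int × Int × Int × Int) : Int :=
  let d := |a.1 - b.1| + |a.2.1 - b.2.1|
  let d := if a.1 ≠ b.1 then
      let lohi := if a.1 < b.1 then (a, b) else (b, a)
      d + (lohi.2.2.2.1 - lohi.1.2.2.2.1) * (1000000 - 1)
    else d
  if a.2.1 ≠ b.2.1 then
      let lohi := if a.2.1 < b.2.1 then (a, b) else (b, a)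
      d + (lohi.2.2.2.2.2.1 - lohi.1.2.2.2.2.2) * (1000000 - 1)
  else d

def pvAltLoop : List (Int × Int × Int × Int × Int × Int) → List Int
  | [] => []
  | a :: rest => rest.map (pvPairDist a) ++ pvAltLoop rest

def find_all_distances_between_galaxies_alt (galaxy_coords : List Int × List Int) (expanding_lines : List Int) (expanding_columns : List Int) : List Int :=
  pvAltLoop ((galaxy_coords.1.zip galaxy_coords.2).map (pvEnrich expanding_lines expanding_columns))

-- ===== PRECONDITION & SPEC =====
-- A indexes galaxy_coords[1] at every index of galaxy_coords[0]; it raises IndexError iff the y-list is shorter.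
def Pre_find_all_distances_between_galaxies (galaxy_coords : List Int × List Int) (expanding_lines : List Int) (expanding_columns : List Int) : Prop :=
  galaxy_coords.1.length ≤ galaxy_coords.2.length
instance (galaxy_coords : List Int × List Int) (expanding_lines : List Int) (expanding_columns : List Int) : Decidable (Pre_find_all_distances_between_galaxies galaxy_coords expanding_lines expanding_columns) := by unfold Pre_find_all_distances_between_galaxies; infer_instance
def pvWitness_find_all_distances_between_galaxies : (List Int × List Int) × List Int × List Int :=
  (([0, 4], [1, 2]), [2], [1])

def Spec_find_all_distances_between_galaxies (galaxy_coords : List Int × List Int) (expanding_lines : List Int) (expanding_columns : List Int) (out : List Int) : Prop := out = find_all_distances_between_galaxies_alt galaxy_coords expanding_lines expanding_columns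
instance (galaxy_coords : List Int × List Int) (expanding_lines : List Int) (expanding_columns : List Int) (out : List Int) : Decidable (Spec_find_all_distances_between_galaxies galaxy_coords expanding_lines expanding_columns out) := by unfold Spec_find_all_distances_between_galaxies; infer_instance

-- ===== CLAIM (what is proved, stated in full; the proofs are below) =====
def Claim_equal_find_all_distances_between_galaxies : Prop := ∀ (galaxy_coords : List Int × List Int) (expanding_lines : List Int) (expanding_columns : List Int), Dom_find_all_distances_between_galaxies galaxy_coords expanding_lines expanding_columns → Pre_find_all_distances_between_galaxies galaxy_coords expanding_lines expanding_columns → Spec_find_all_distances_between_galaxies galaxy_coords expanding_lines expanding_columns (find_all_distances_between_galaxies galaxy_coords expanding_lines expanding_columns)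

-- ===== LEMMAS AND PROOFS =====

lemma sorted_two (a b : Int) :
    PySem.List.sorted [a, b] (fun x => x) false = if a ≤ b then [a, b] else [b, a] := by
  split_ifs with h
  · exact PySem.List.sorted_id_eq_of_perm_of_pairwise _ _ (List.Perm.refl _) (by simp [h])
  · exact PySem.List.sorted_id_eq_of_perm_of_pairwise _ _ (List.Perm.swap a b []) (by simp; omega)

lemma betsum_lt (lo hi : Int) (h : lo < hi) (es : List Int) :
    (es.map (fun l => if lo < l ∧ l < hi then (1 : Int) else 0)).sum
      = (es.countP (fun e => e < hi) : Int) - (es.countP (fun e => e ≤ lo) : Int) := by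
  induction es with
  | nil => simp
  | cons a t ih =>
    simp only [List.map_cons, List.sum_cons, ih, List.countP_cons, Nat.cast_add,
      apply_ite (fun n : Nat => (n : Int)), Nat.cast_one, Nat.cast_zero, decide_eq_true_eq]
    split_ifs <;> omega

lemma betsum_eq (es : List Int) (lo : Int) :
    (es.map (fun l => if lo < l ∧ l < lo then (1 : Int) else 0)).sum = 0 := by
  have h : ∀ l : Int, ¬(lo < l ∧ l < lo) := by omega
  simp [h]

lemma pvCounts_aux (v : Int) (es : List Int) : ∀ (p q : Int),
    es.foldl (fun (r : Int × Int) e =>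
      (if e < v then r.1 + 1 else r.1, if e ≤ v then r.2 + 1 else r.2)) (p, q)
    = (p + es.countP (fun e => e < v), q + es.countP (fun e => e ≤ v)) := by
  induction es with
  | nil => simp
  | cons a t ih =>
    intro p q
    simp only [List.foldl_cons, ih, List.countP_cons, Prod.ext_iff, Nat.cast_add,
      apply_ite (fun n : Nat => (n : Int)), Nat.cast_one, Nat.cast_zero, decide_eq_true_eq]
    constructor <;> split_ifs <;> omega

lemma pvCounts_eq (es : List Int) (v : Int) :
    pvCounts es v = ((es.countP (fun e => e < v) : Int), (es.countP (fun e => e ≤ v) : Int)) := by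
  unfold pvCounts; rw [pvCounts_aux]; simp

lemma pointwise (a b : Int × Int) (el ec : List Int) :
    find_distance a b el ec = pvPairDist (pvEnrich el ec a) (pvEnrich el ec b) := by
  obtain ⟨x1, y1⟩ := a; obtain ⟨x2, y2⟩ := b
  simp only [find_distance, pvPairDist, pvEnrich, pvCounts_eq, sorted_two]
  rcases lt_trichotomy x1 x2 with hx | hx | hx <;> rcases lt_trichotomy y1 y2 with hy | hy | hy
  · rw [if_pos hx.le, if_pos hy.le, if_pos hx.ne, if_pos hy.ne, if_pos hx, if_pos hy]
    simp only [PySem.List.pyGetD_ofNat', List.getD, List.getElem?_cons_zero,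
      List.getElem?_cons_succ, Option.getD_some]
    rw [betsum_lt x1 x2 hx el, betsum_lt y1 y2 hy ec,
      abs_of_neg (by omega : x1 - x2 < 0), abs_of_neg (by omega : y1 - y2 < 0)]
    ring
  · subst hy
    rw [if_pos hx.le, if_pos (le_refl y1), if_pos hx.ne, if_neg (by simp : ¬ y1 ≠ y1), if_pos hx]
    simp only [PySem.List.pyGetD_ofNat', List.getD, List.getElem?_cons_zero,
      List.getElem?_cons_succ, Option.getD_some]
    rw [betsum_lt x1 x2 hx el, betsum_eq ec y1,
      abs_of_neg (by omega : x1 - x2 < 0), sub_self, abs_zero]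
    ring
  · rw [if_pos hx.le, if_neg (not_le.mpr hy), if_pos hx.ne, if_pos hy.ne', if_pos hx,
      if_neg (by omega : ¬ y1 < y2)]
    simp only [PySem.List.pyGetD_ofNat', List.getD, List.getElem?_cons_zero,
      List.getElem?_cons_succ, Option.getD_some]
    rw [betsum_lt x1 x2 hx el, betsum_lt y2 y1 hy ec,
      abs_of_neg (by omega : x1 - x2 < 0), abs_of_pos (by omega : (0:Int) < y1 - y2)]
    ring
  · subst hx
    rw [if_pos (le_refl x1), if_pos hy.le, if_neg (by simp : ¬ x1 ≠ x1), if_pos hy.ne, if_pos hy]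
    simp only [PySem.List.pyGetD_ofNat', List.getD, List.getElem?_cons_zero,
      List.getElem?_cons_succ, Option.getD_some]
    rw [betsum_eq el x1, betsum_lt y1 y2 hy ec, sub_self, abs_zero,
      abs_of_neg (by omega : y1 - y2 < 0)]
    ring
  · subst hx; subst hy
    rw [if_pos (le_refl x1), if_pos (le_refl y1), if_neg (by simp : ¬ x1 ≠ x1),
      if_neg (by simp : ¬ y1 ≠ y1)]
    simp only [PySem.List.pyGetD_ofNat', List.getD, List.getElem?_cons_zero,
      List.getElem?_cons_succ, Option.getD_some]
    rw [betsum_eq el x1, betsum_eq ec y1]; simp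
  · subst hx
    rw [if_pos (le_refl x1), if_neg (not_le.mpr hy), if_neg (by simp : ¬ x1 ≠ x1), if_pos hy.ne',
      if_neg (by omega : ¬ y1 < y2)]
    simp only [PySem.List.pyGetD_ofNat', List.getD, List.getElem?_cons_zero,
      List.getElem?_cons_succ, Option.getD_some]
    rw [betsum_eq el x1, betsum_lt y2 y1 hy ec, sub_self, abs_zero,
      abs_of_pos (by omega : (0:Int) < y1 - y2)]
    ring
  · rw [if_neg (not_le.mpr hx), if_pos hy.le, if_pos hx.ne', if_pos hy.ne,
      if_neg (by omega : ¬ x1 < x2), if_pos hy]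
    simp only [PySem.List.pyGetD_ofNat', List.getD, List.getElem?_cons_zero,
      List.getElem?_cons_succ, Option.getD_some]
    rw [betsum_lt x2 x1 hx el, betsum_lt y1 y2 hy ec,
      abs_of_pos (by omega : (0:Int) < x1 - x2), abs_of_neg (by omega : y1 - y2 < 0)]
    ring
  · subst hy
    rw [if_neg (not_le.mpr hx), if_pos (le_refl y1), if_pos hx.ne', if_neg (by simp : ¬ y1 ≠ y1),
      if_neg (by omega : ¬ x1 < x2)]
    simp only [PySem.List.pyGetD_ofNat', List.getD, List.getElem?_cons_zero,
      List.getElem?_cons_succ, Option.getD_some]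
    rw [betsum_lt x2 x1 hx el, betsum_eq ec y1,
      abs_of_pos (by omega : (0:Int) < x1 - x2), sub_self, abs_zero]
    ring
  · rw [if_neg (not_le.mpr hx), if_neg (not_le.mpr hy), if_pos hx.ne', if_pos hy.ne',
      if_neg (by omega : ¬ x1 < x2), if_neg (by omega : ¬ y1 < y2)]
    simp only [PySem.List.pyGetD_ofNat', List.getD, List.getElem?_cons_zero,
      List.getElem?_cons_succ, Option.getD_some]
    rw [betsum_lt x2 x1 hx el, betsum_lt y2 y1 hy ec,
      abs_of_pos (by omega : (0:Int) < x1 - x2), abs_of_pos (by omega : (0:Int) < y1 - y2)]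
    ring

def aPairs (el ec : List Int) : List (Int × Int) → List Int
  | [] => []
  | a :: r => r.map (fun b => find_distance a b el ec) ++ aPairs el ec r

lemma outer_aux (el ec : List Int) : ∀ (g : List (Int × Int)) (acc : List Int),
    (List.range g.length).foldl (fun dists k => dists ++ ((g.drop (k + 1)).map
      (fun b => find_distance (g.getD k (0, 0)) b el ec))) acc
    = acc ++ aPairs el ec g := by
  intro g
  induction g with
  | nil => simp [aPairs]
  | cons a t ih =>
    intro acc
    rw [List.length_cons, List.range_succ_eq_map, List.foldl_cons, List.foldl_map]
    simp only [List.getD_cons_zero, List.drop_succ_cons, List.drop_zero, Nat.succ_eq_add_one,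
      List.getD_cons_succ]
    rw [ih]
    simp [aPairs]

lemma A_eq_aPairs (xs ys : List Int) (el ec : List Int) (h : xs.length ≤ ys.length) :
    find_all_distances_between_galaxies (xs, ys) el ec = aPairs el ec (xs.zip ys) := by
  have hg : (xs.zip ys).length = xs.length := by simp [List.length_zip]; omega
  unfold find_all_distances_between_galaxies
  simp only
  rw [PySem.List.pyRange_zero_nat xs.length, List.foldl_map]
  rw [PySem.List.foldl_congr_mem (List.range xs.length) _
    (fun dists k => dists ++ (((xs.zip ys).drop (k + 1)).map
      (fun b => find_distance ((xs.zip ys).getD k (0, 0)) b el ec))) [] ?_]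
  · rw [← hg, outer_aux]; simp
  · intro acc k hk
    rw [List.mem_range] at hk
    have hky : k < ys.length := lt_of_lt_of_le hk h
    have hkg : k < (xs.zip ys).length := by omega
    -- inner fold: convert indexing of xs/ys to indexing of the zip
    rw [PySem.List.foldl_congr_mem (PySem.List.pyRange ((k : Int) + 1) xs.length) _
      (fun ds ib => ds ++ [find_distance (PySem.List.pyGetD xs k 0, PySem.List.pyGetD ys k 0)
        (PySem.List.pyGetD (xs.zip ys) ib (0, 0)) el ec]) acc ?_]
    · have : ((k : Int) + 1) = ((k + 1 : Nat) : Int) := by push_cast; ring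
      rw [this, show ((xs.length : Int)) = ((xs.zip ys).length : Int) by rw [hg],
        PySem.List.foldl_pyRange_pyGetD' (xs.zip ys) (0, 0)
          (fun ds b => ds ++ [find_distance _ b el ec]) acc (by positivity),
        PySem.List.foldl_append_singleton_eq_map]
      simp only [Int.toNat_natCast]
      have hga : (xs.getD k 0, ys.getD k 0) = (xs.zip ys).getD k (0, 0) := by
        rw [List.getD_eq_getElem _ _ hk, List.getD_eq_getElem _ _ hky, List.getD_eq_getElem _ _ hkg,
          List.getElem_zip]
      simp only [PySem.List.pyGetD_natCast, hga]
    · intro ds ib hib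
      rw [PySem.List.mem_pyRange_one] at hib
      have h0 : 0 ≤ ib := by omega
      have h1 : ib < ((xs.zip ys).length : Int) := by omega
      congr 2
      rw [PySem.List.pyGetD_eq_getElem _ _ h0 (by omega), PySem.List.pyGetD_eq_getElem _ _ h0 (by omega),
        PySem.List.pyGetD_eq_getElem _ _ h0 h1, List.getElem_zip]

lemma altLoop_eq (el ec : List Int) (g : List (Int × Int)) :
    pvAltLoop (g.map (pvEnrich el ec)) = aPairs el ec g := by
  induction g with
  | nil => simp [pvAltLoop, aPairs]
  | cons a t ih =>
    simp only [List.map_cons, pvAltLoop, List.map_map, aPairs, ih]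
    congr 1
    exact List.map_congr_left (fun b _ => (pointwise a b el ec).symm)

-- ===== VERDICT (by name: the statement is the Claim_ definition above) =====
theorem find_all_distances_between_galaxies_spec : Claim_equal_find_all_distances_between_galaxies := by
  intro gc el ec _ hpre
  obtain ⟨xs, ys⟩ := gc
  unfold Spec_find_all_distances_between_galaxies
  rw [A_eq_aPairs xs ys el ec hpre]
  unfold find_all_distances_between_galaxies_alt
  exact (altLoop_eq el ec (xs.zip ys)).symm
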